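-- pv_equiv track=rewrite | github.com/abargar/mex-election-2018 | db/tweets_to_sqldb.py | parse_entities
-- ===== SOURCE A (Python) =====
-- def parse_entities(entities):
--     entity_list = []
--     if entities is not None:
--         urls = entities.get("urls")
--         if urls is not None and len(urls) > 0:
--             url_links = [(u['expanded_url'], 'url') for u in urls]
--             entity_list.extend(url_links)
--         media = entities.get("media")
--         if media is not None and len(media) > 0:
--             media_links = [(m['media_url'], 'media') for m in media]
--             entity_list.extend(media_links)
--         hashtags = entities.get("hashtags")
--         if hashtags is not None and len(hashtags) > 0:
--             hashs = [(h['text'], "hashtag") for h in hashtags]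
--             entity_list.extend(hashs)
--         mentions = entities.get("user_mentions")
--         if mentions is not None and len(mentions) > 0:
--             ments = [(m['screen_name'], "mention") for m in mentions]
--             entity_list.extend(ments)
--         symbols = entities.get("symbols")
--         if symbols is not None and len(symbols) > 0:
--             symbs = [(s['text'], "symbol") for s in symbols]
--             entity_list.extend(symbs)
--     return entity_list
-- ===== SOURCE B (Python) =====
-- _SPEC = {
--     "urls": ("url", "expanded_url"),
--     "media": ("media", "media_url"),
--     "hashtags": ("hashtag", "text"),
--     "user_mentions": ("mention", "screen_name"),
--     "symbols": ("symbol", "text"),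
-- }
--
-- def parse_entities(entities):
--     if entities is None:
--         return []
--     # one pass over whatever categories the input actually carries
--     buckets = {}
--     for key, vals in entities.items():
--         spec = _SPEC.get(key)
--         if spec is not None and len(vals) > 0:
--             tag, field = spec
--             buckets[key] = [(item[field], tag) for item in vals]
--     # reassemble in the canonical category order
--     out = []
--     for key in ("urls", "media", "hashtags", "user_mentions", "symbols"):
--         out.extend(buckets.get(key, []))
--     return out
-- ===== Notes on version B (the rewrite author's own statement) =====
-- stated objective: alternative
-- what changed: Instead of five hard-coded lookups into the entities dict, B makes a single pass over entities.items(), filing each recognised non-empty category's tuples into a bucket dict, and then concatenates the buckets in the canonical category order; Pre_ excludes inputs where a listed item lacks its category field (KeyError) and association lists with duplicate top-level keys, which no Python dict can produce.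
import Mathlib
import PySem

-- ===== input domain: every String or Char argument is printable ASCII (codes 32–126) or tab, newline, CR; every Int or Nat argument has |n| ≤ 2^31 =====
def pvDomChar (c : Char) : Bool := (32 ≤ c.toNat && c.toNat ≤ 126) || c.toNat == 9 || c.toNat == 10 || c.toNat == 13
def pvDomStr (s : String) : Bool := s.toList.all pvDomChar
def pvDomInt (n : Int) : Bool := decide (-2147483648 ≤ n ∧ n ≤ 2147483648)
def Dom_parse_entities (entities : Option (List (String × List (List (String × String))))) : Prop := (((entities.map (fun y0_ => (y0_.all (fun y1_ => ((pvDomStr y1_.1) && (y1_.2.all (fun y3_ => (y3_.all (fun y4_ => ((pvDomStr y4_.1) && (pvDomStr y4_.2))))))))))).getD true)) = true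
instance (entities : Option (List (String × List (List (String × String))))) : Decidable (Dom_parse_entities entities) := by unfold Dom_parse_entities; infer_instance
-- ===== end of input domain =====

-- B replaces A's five hard-coded lookups by one pass over the input's items into keyed
-- buckets, reassembled in canonical category order; objective: alternative decomposition.

-- ===== PORT A =====
-- item[field] (Python raises KeyError on a missing key) is ported as getD with ""
-- default; Pre_parse_entities excludes exactly the inputs where the key is missing.
def parse_entities (entities : Option (List (String × List (List (String × String))))) : List (String × String) :=
  match entities with
  | none => []
  | some ents =>
    let entity_list : List (String × String) := []
    let entity_list :=
      match PySem.Dict.get? (PySem.Dict.mk ents) "urls" with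
      | some urls =>
        if urls.length > 0 then
          entity_list ++ urls.map (fun u => (PySem.Dict.getD (PySem.Dict.mk u) "expanded_url" "", "url"))
        else entity_list
      | none => entity_list
    let entity_list :=
      match PySem.Dict.get? (PySem.Dict.mk ents) "media" with
      | some media =>
        if media.length > 0 then
          entity_list ++ media.map (fun m => (PySem.Dict.getD (PySem.Dict.mk m) "media_url" "", "media"))
        else entity_list
      | none => entity_list
    let entity_list :=
      match PySem.Dict.get? (PySem.Dict.mk ents) "hashtags" with
      | some hashtags =>
        if hashtags.length > 0 then
          entity_list ++ hashtags.map (fun h => (PySem.Dict.getD (PySem.Dict.mk h) "text" "", "hashtag"))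
        else entity_list
      | none => entity_list
    let entity_list :=
      match PySem.Dict.get? (PySem.Dict.mk ents) "user_mentions" with
      | some mentions =>
        if mentions.length > 0 then
          entity_list ++ mentions.map (fun m => (PySem.Dict.getD (PySem.Dict.mk m) "screen_name" "", "mention"))
        else entity_list
      | none => entity_list
    let entity_list :=
      match PySem.Dict.get? (PySem.Dict.mk ents) "symbols" with
      | some symbols =>
        if symbols.length > 0 then
          entity_list ++ symbols.map (fun s => (PySem.Dict.getD (PySem.Dict.mk s) "text" "", "symbol"))
        else entity_list
      | none => entity_list
    entity_list

-- ===== PORT B =====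
-- _SPEC: category key ↦ (tag, item field)
def pvSpec : PySem.Dict String (String × String) :=
  PySem.Dict.mk [("urls", ("url", "expanded_url")),
                 ("media", ("media", "media_url")),
                 ("hashtags", ("hashtag", "text")),
                 ("user_mentions", ("mention", "screen_name")),
                 ("symbols", ("symbol", "text"))]

-- loop body of B's single pass over entities.items()
def pvStep (b : PySem.Dict String (List (String × String)))
    (p : String × List (List (String × String))) : PySem.Dict String (List (String × String)) :=
  match PySem.Dict.get? pvSpec p.1 with
  | some spec =>
    if p.2.length > 0 then
      b.insert p.1 (p.2.map (fun item => (PySem.Dict.getD (PySem.Dict.mk item) spec.2 "", spec.1)))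
    else b
  | none => b

def parse_entities_alt (entities : Option (List (String × List (List (String × String))))) : List (String × String) :=
  match entities with
  | none => []
  | some ents =>
    let buckets := ents.foldl pvStep PySem.Dict.empty
    ["urls", "media", "hashtags", "user_mentions", "symbols"].foldl
      (fun out k => out ++ PySem.Dict.getD buckets k []) []

-- ===== PRECONDITION & SPEC =====
-- Pre_ excludes (a) inputs where Python's item[field] raises KeyError — some listed
-- entity item lacks the field its category requires — and (b) association lists with
-- duplicate top-level keys, which no Python dict can produce (there first-match lookup
-- vs. a pass over the items is an artefact of the assoc-list model, not of A or B).
def Pre_parse_entities (entities : Option (List (String × List (List (String × String))))) : Prop :=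
  (match entities with
   | none => true
   | some ents =>
     decide ((ents.map Prod.fst).Nodup) &&
     [("urls", "expanded_url"), ("media", "media_url"), ("hashtags", "text"),
      ("user_mentions", "screen_name"), ("symbols", "text")].all (fun row =>
       ents.all (fun p =>
         !(p.1 == row.1) ||
         p.2.all (fun item => (PySem.Dict.get? (PySem.Dict.mk item) row.2).isSome)))) = true
instance (entities : Option (List (String × List (List (String × String))))) : Decidable (Pre_parse_entities entities) := by unfold Pre_parse_entities; infer_instance
def pvWitness_parse_entities : (Option (List (String × List (List (String × String))))) :=
  some [("urls", [[("expanded_url", "http://x")]]), ("hashtags", [[("text", "h")]])]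
def Spec_parse_entities (entities : Option (List (String × List (List (String × String))))) (out : List (String × String)) : Prop := out = parse_entities_alt entities
instance (entities : Option (List (String × List (List (String × String))))) (out : List (String × String)) : Decidable (Spec_parse_entities entities out) := by unfold Spec_parse_entities; infer_instance

-- ===== CLAIM (what is proved, stated in full; the proofs are below) =====
def Claim_equal_parse_entities : Prop := ∀ (entities : Option (List (String × List (List (String × String))))), Dom_parse_entities entities → Pre_parse_entities entities → Spec_parse_entities entities (parse_entities entities)

-- ===== LEMMAS AND PROOFS =====

-- a key not among the items' keys is never touched by the bucket pass
lemma bucket_not_mem (l : List (String × List (List (String × String))))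
    (b : PySem.Dict String (List (String × String))) (k : String)
    (h : k ∉ l.map Prod.fst) :
    (l.foldl pvStep b).getD k [] = b.getD k [] := by
  induction l generalizing b with
  | nil => rfl
  | cons p t ih =>
    simp only [List.map_cons, List.mem_cons, not_or] at h
    rw [List.foldl_cons, ih _ h.2]
    unfold pvStep
    cases PySem.Dict.get? pvSpec p.1 with
    | none => rfl
    | some spec =>
      by_cases hl : p.2.length > 0
      · simp only [hl, if_pos, PySem.Dict.getD_insert_of_ne _ _ _ h.1]
      · simp [hl]

-- the bucket of a key present (once) among the items
lemma bucket_mem (l : List (String × List (List (String × String))))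
    (b : PySem.Dict String (List (String × String))) (k : String)
    (vals : List (List (String × String)))
    (hnd : (l.map Prod.fst).Nodup) (hmem : (k, vals) ∈ l) :
    (l.foldl pvStep b).getD k [] =
      (match PySem.Dict.get? pvSpec k with
       | some spec =>
         if vals.length > 0 then
           vals.map (fun item => (PySem.Dict.getD (PySem.Dict.mk item) spec.2 "", spec.1))
         else b.getD k []
       | none => b.getD k []) := by
  induction l generalizing b with
  | nil => cases hmem
  | cons p t ih =>
    simp only [List.map_cons, List.nodup_cons] at hnd
    rcases List.mem_cons.mp hmem with hp | ht
    · subst hp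
      have hk : k ∉ t.map Prod.fst := hnd.1
      rw [List.foldl_cons, bucket_not_mem t _ k hk]
      unfold pvStep
      cases PySem.Dict.get? pvSpec k with
      | none => rfl
      | some spec =>
        by_cases hl : vals.length > 0
        · simp [hl, PySem.Dict.getD_insert_self]
        · simp [hl]
    · have hne : p.1 ≠ k := by
        intro he
        exact hnd.1 (he ▸ (List.mem_map.mpr ⟨(k, vals), ht, rfl⟩))
      have hstep : (pvStep b p).getD k [] = b.getD k [] := by
        unfold pvStep
        cases PySem.Dict.get? pvSpec p.1 with
        | none => rfl
        | some spec =>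
          by_cases hl : p.2.length > 0
          · simp only [hl, if_pos, PySem.Dict.getD_insert_of_ne _ _ _ (Ne.symm hne)]
          · simp [hl]
      rw [List.foldl_cons, ih _ hnd.2 ht, hstep]

-- the bucket of a spec'ed key equals A's per-category block
lemma bucket_key_eq (ents : List (String × List (List (String × String))))
    (hnd : (ents.map Prod.fst).Nodup) (k : String) (spec : String × String)
    (hspec : PySem.Dict.get? pvSpec k = some spec) :
    (ents.foldl pvStep PySem.Dict.empty).getD k [] =
      (match PySem.Dict.get? (PySem.Dict.mk ents) k with
       | some vals =>
         if vals.length > 0 then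
           vals.map (fun item => (PySem.Dict.getD (PySem.Dict.mk item) spec.2 "", spec.1))
         else []
       | none => []) := by
  have hkeys : (PySem.Dict.mk ents).keys.Nodup := by
    simpa [PySem.Dict.keys_mk] using hnd
  cases hg : PySem.Dict.get? (PySem.Dict.mk ents) k with
  | none =>
    have hk : k ∉ ents.map Prod.fst := by
      have := (PySem.Dict.get?_eq_none_iff_not_mem_keys (PySem.Dict.mk ents) k).mp hg
      simpa [PySem.Dict.keys_mk] using this
    rw [bucket_not_mem ents _ k hk]; rfl
  | some vals =>
    have hmem : (k, vals) ∈ ents := by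
      have := ((PySem.Dict.get?_eq_some_iff_mem_items (PySem.Dict.mk ents) k vals hkeys).mp hg)
      simpa using this
    rw [bucket_mem ents _ k vals hnd hmem, hspec]
    by_cases hl : vals.length > 0 <;> simp [hl, PySem.Dict.getD_empty]

-- A's accumulator step, rephrased as appending a (possibly empty) block
lemma chain_step (acc : List (String × String))
    (o : Option (List (List (String × String))))
    (f : List (List (String × String)) → List (String × String)) :
    (match o with
     | some v => if v.length > 0 then acc ++ f v else acc
     | none => acc) =
    acc ++ (match o with
            | some v => if v.length > 0 then f v else []
            | none => []) := by
  cases o with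
  | none => simp
  | some v => by_cases hg : v.length > 0 <;> simp [hg]

-- ===== VERDICT (by name: the statement is the Claim_ definition above) =====
theorem parse_entities_spec : Claim_equal_parse_entities := by
  intro entities _ hpre
  unfold Spec_parse_entities
  cases entities with
  | none => rfl
  | some ents =>
    unfold Pre_parse_entities at hpre
    simp only [Bool.and_eq_true, decide_eq_true_eq] at hpre
    obtain ⟨hnd, -⟩ := hpre
    show parse_entities (some ents) = parse_entities_alt (some ents)
    unfold parse_entities parse_entities_alt
    simp only [List.foldl_cons, List.foldl_nil]
    rw [bucket_key_eq ents hnd "urls" ("url", "expanded_url") rfl,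
        bucket_key_eq ents hnd "media" ("media", "media_url") rfl,
        bucket_key_eq ents hnd "hashtags" ("hashtag", "text") rfl,
        bucket_key_eq ents hnd "user_mentions" ("mention", "screen_name") rfl,
        bucket_key_eq ents hnd "symbols" ("symbol", "text") rfl]
    simp only [chain_step]
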